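-- pv_equiv track=rewrite | github.com/inksong/pkvic | PIN/06-PIN-Gen.py | normalizestrtoset
-- ===== SOURCE A (Python) =====
-- def normalizestrtoset(inputstr):
--     inputstr = str(inputstr).lower()
--     spcs = ['!', '@', '#', '$', '%', '^', '&', '*', '(', ')', '-', '_', '.', ',', '/', '|', '[', ']', '{', '}', "'",
--             '"', '\\', '+', ' ']
--     for one in spcs:
--         inputstr = str(inputstr).replace(one, '.')
--     tmplist = inputstr.split('.')
--     rtnset = set()
--     for oneitem in tmplist:
--         if len(oneitem) > 1:
--             rtnset.add(oneitem)
--     return rtnset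
-- ===== SOURCE B (Python) =====
-- def normalizestrtoset(inputstr):
--     s = str(inputstr).lower()
--     seps = set('!@#$%^&*()-_.,/|[]{}\'"\\+ ')
--     rtnset = set()
--     buf = []
--     for ch in s:
--         if ch in seps:
--             if len(buf) > 1:
--                 rtnset.add(''.join(buf))
--             buf = []
--         else:
--             buf.append(ch)
--     if len(buf) > 1:
--         rtnset.add(''.join(buf))
--     return rtnset
-- ===== Notes on version B (the rewrite author's own statement) =====
-- stated objective: alternative
-- what changed: Replaces A's 25 whole-string replace passes followed by a split pass and a filter pass with a single left-to-right scan that buffers the current token and flushes it into the result set at each separator; it trades A's C-level str passes for one explicit Python loop.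
import Mathlib
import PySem

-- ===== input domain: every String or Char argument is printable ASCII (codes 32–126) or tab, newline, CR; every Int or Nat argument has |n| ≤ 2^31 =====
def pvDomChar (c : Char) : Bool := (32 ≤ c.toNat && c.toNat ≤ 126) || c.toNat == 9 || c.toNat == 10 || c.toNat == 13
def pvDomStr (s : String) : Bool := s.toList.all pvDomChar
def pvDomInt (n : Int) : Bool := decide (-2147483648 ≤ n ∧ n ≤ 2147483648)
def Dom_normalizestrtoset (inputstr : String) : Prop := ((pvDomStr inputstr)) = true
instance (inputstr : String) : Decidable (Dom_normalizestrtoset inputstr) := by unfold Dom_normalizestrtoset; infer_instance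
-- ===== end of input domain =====

-- B replaces A's 25 whole-string replace passes + split + filter by a single buffered scan (objective: alternative decomposition, same asymptotic cost).

-- ===== PORT A =====
def pvSpcs : List String := ["!", "@", "#", "$", "%", "^", "&", "*", "(", ")", "-", "_", ".", ",", "/", "|", "[", "]", "{", "}", "'", "\"", "\\", "+", " "]

def normalizestrtoset (inputstr : String) : List String :=
  let s0 := PySem.Str.lower inputstr
  let s1 := pvSpcs.foldl (fun acc one => PySem.Str.replace acc one ".") s0
  -- s1.split('.'): separator "." is nonempty, so Python's split is exactly Chars.splitOn (= Str.split?'s some-branch)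
  let tmplist := (PySem.Chars.splitOn s1.toList ['.']).map String.ofList
  tmplist.foldl (fun rtnset oneitem =>
    if PySem.Str.len oneitem > 1 then PySem.Set.add rtnset oneitem else rtnset) PySem.Set.empty

-- ===== PORT B =====
def pvSepChars : PySem.Set Char := PySem.Set.ofList "!@#$%^&*()-_.,/|[]{}'\"\\+ ".toList

def pvFlush (rtnset : PySem.Set String) (buf : List Char) : PySem.Set String :=
  if buf.length > 1 then PySem.Set.add rtnset (String.ofList buf) else rtnset

def pvScan : List Char → PySem.Set String → List Char → PySem.Set String
  | [], rtnset, buf => pvFlush rtnset buf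
  | c :: t, rtnset, buf =>
      if PySem.Set.contains pvSepChars c then pvScan t (pvFlush rtnset buf) []
      else pvScan t rtnset (buf ++ [c])

def normalizestrtoset_alt (inputstr : String) : List String :=
  pvScan (PySem.Str.lower inputstr).toList PySem.Set.empty []

-- ===== PRECONDITION & SPEC =====
def Spec_normalizestrtoset (inputstr : String) (out : List String) : Prop := out = normalizestrtoset_alt inputstr
instance (inputstr : String) (out : List String) : Decidable (Spec_normalizestrtoset inputstr out) := by unfold Spec_normalizestrtoset; infer_instance

-- ===== CLAIM (what is proved, stated in full; the proofs are below) =====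
def Claim_equal_normalizestrtoset : Prop := ∀ (inputstr : String), Dom_normalizestrtoset inputstr → Spec_normalizestrtoset inputstr (normalizestrtoset inputstr)

-- ===== LEMMAS AND PROOFS =====

def pvSepList : List Char := ['!', '@', '#', '$', '%', '^', '&', '*', '(', ')', '-', '_', '.', ',', '/', '|', '[', ']', '{', '}', '\'', '"', '\\', '+', ' ']

def pvSubst (c : Char) : Char := if c ∈ pvSepList then '.' else c

-- replace with a one-char pattern is a per-character substitution
theorem pv_replace_go_single (o : Char) (l : List Char) : ∀ (fuel : Nat) (acc : List Char), l.length ≤ fuel →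
    PySem.Chars.replace.go [o] ['.'] fuel l acc = acc.reverse ++ l.map (fun c => if c = o then '.' else c) := by
  induction l with
  | nil => intro fuel acc _; cases fuel <;> simp [PySem.Chars.replace.go]
  | cons c t ih =>
      intro fuel acc hle
      cases fuel with
      | zero => simp at hle
      | succ fuel =>
          simp only [PySem.Chars.replace.go, List.isPrefixOf]
          by_cases h : c = o
          · subst h
            rw [if_pos (by simp)]
            simp only [List.length_cons, List.length_nil, List.drop_succ_cons, List.drop_zero,
              List.reverse_singleton, List.singleton_append]
            rw [ih fuel ('.' :: acc) (Nat.le_of_succ_le_succ hle)]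
            simp
          · have hb : (o == c) = false := beq_eq_false_iff_ne.mpr fun e => h e.symm
            rw [if_neg (by simp [hb])]
            rw [ih fuel (c :: acc) (Nat.le_of_succ_le_succ hle)]
            simp [h]

theorem pv_replace_single (o : Char) (l : List Char) :
    PySem.Chars.replace l [o] ['.'] = l.map (fun c => if c = o then '.' else c) := by
  simpa [PySem.Chars.replace] using pv_replace_go_single o l l.length [] le_rfl

theorem pv_compFold_dot (os : List Char) :
    os.foldl (fun x o => if x = o then '.' else x) '.' = '.' := by
  induction os with
  | nil => rfl
  | cons o t ih => by_cases h : ('.' : Char) = o <;> simp [h, ih]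

theorem pv_compFold (os : List Char) (c : Char) :
    os.foldl (fun x o => if x = o then '.' else x) c = if c ∈ os then '.' else c := by
  induction os generalizing c with
  | nil => simp
  | cons o t ih =>
      by_cases h : c = o
      · simp [h, pv_compFold_dot]
      · simp [List.foldl_cons, h, ih]

theorem pv_fold_maps (os : List Char) (l : List Char) :
    os.foldl (fun l o => l.map (fun c => if c = o then '.' else c)) l
      = l.map (fun c => os.foldl (fun x o => if x = o then '.' else x) c) := by
  induction os generalizing l with
  | nil => simp
  | cons o t ih => simp [List.foldl_cons, ih, List.map_map, Function.comp]

theorem pv_spcs_eq : pvSpcs = pvSepList.map (fun c => String.ofList [c]) := by decide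

theorem pv_fold_replace (os : List Char) (s : String) :
    ((os.map (fun c => String.ofList [c])).foldl (fun acc one => PySem.Str.replace acc one ".") s).toList
      = os.foldl (fun l o => l.map (fun c => if c = o then '.' else c)) s.toList := by
  induction os generalizing s with
  | nil => simp
  | cons o t ih =>
      simp only [List.map_cons, List.foldl_cons, ih, PySem.Str.toList_replace]
      have h1 : (String.ofList [o]).toList = [o] := by simp
      have h2 : ("." : String).toList = ['.'] := rfl
      rw [h1, h2, pv_replace_single]

theorem pv_foldA (s : String) :
    (pvSpcs.foldl (fun acc one => PySem.Str.replace acc one ".") s).toList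
      = s.toList.map pvSubst := by
  rw [pv_spcs_eq, pv_fold_replace, pv_fold_maps]
  refine List.map_congr_left fun c _ => ?_
  rw [pv_compFold]; rfl

-- structural characterisation of split('.') on the char level
def pvTokens : List Char → List Char → List (List Char)
  | [], cur => [cur.reverse]
  | c :: t, cur => if c = '.' then cur.reverse :: pvTokens t [] else pvTokens t (c :: cur)


theorem pv_splitOn_go_dot (l : List Char) : ∀ (fuel : Nat) (cur : List Char) (acc : List (List Char)),
    l.length ≤ fuel →
    PySem.Chars.splitOn.go ['.'] fuel l cur acc = acc.reverse ++ pvTokens l cur := by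
  induction l with
  | nil => intro fuel cur acc _; cases fuel <;> simp [PySem.Chars.splitOn.go, pvTokens]
  | cons c t ih =>
      intro fuel cur acc hle
      cases fuel with
      | zero => simp at hle
      | succ fuel =>
          simp only [PySem.Chars.splitOn.go, List.isPrefixOf]
          by_cases h : c = '.'
          · subst h
            rw [if_pos (by simp)]
            simp only [List.length_cons, List.length_nil, List.drop_succ_cons, List.drop_zero]
            rw [ih fuel [] (cur.reverse :: acc) (Nat.le_of_succ_le_succ hle)]
            simp [pvTokens]
          · have hb : (('.' : Char) == c) = false := beq_eq_false_iff_ne.mpr fun e => h e.symm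
            rw [if_neg (by simp [hb])]
            rw [ih fuel (c :: cur) acc (Nat.le_of_succ_le_succ hle)]
            simp [pvTokens, h]

theorem pv_splitOn_dot (l : List Char) :
    PySem.Chars.splitOn l ['.'] = pvTokens l [] := by
  simpa [PySem.Chars.splitOn] using pv_splitOn_go_dot l (l.length + 1) [] [] (Nat.le_succ _)

theorem pv_sep_mem (c : Char) : PySem.Set.contains pvSepChars c = decide (c ∈ pvSepList) := by
  have h : (pvSepChars : List Char) = pvSepList := by decide
  by_cases hc : c ∈ pvSepList
  · simp [PySem.Set.contains, h, hc]
  · simp [PySem.Set.contains, h, hc]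

theorem pv_flush_step (rtnset : PySem.Set String) (buf : List Char) :
    pvFlush rtnset buf
      = (if PySem.Str.len (String.ofList buf) > 1 then PySem.Set.add rtnset (String.ofList buf) else rtnset) := by
  have : PySem.Str.len (String.ofList buf) = (buf.length : Int) := by simp [PySem.Str.len]
  rw [this]
  by_cases h : buf.length > 1
  · rw [pvFlush, if_pos h, if_pos (by exact_mod_cast h)]
  · rw [pvFlush, if_neg h, if_neg (by exact_mod_cast h)]

theorem pv_scan_tokens (l : List Char) : ∀ (rtnset : PySem.Set String) (buf : List Char),
    pvScan l rtnset buf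
      = ((pvTokens (l.map pvSubst) buf.reverse).map String.ofList).foldl
          (fun rtnset oneitem => if PySem.Str.len oneitem > 1 then PySem.Set.add rtnset oneitem else rtnset) rtnset := by
  induction l with
  | nil =>
      intro rtnset buf
      simp [pvScan, pvTokens, pv_flush_step]
  | cons c t ih =>
      intro rtnset buf
      rw [pvScan, pv_sep_mem]
      by_cases h : c ∈ pvSepList
      · have hs : pvSubst c = '.' := by simp [pvSubst, h]
        simp only [h, decide_true, if_pos, List.map_cons, hs]
        rw [ih (pvFlush rtnset buf) []]
        simp [pvTokens, pv_flush_step]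
      · have hs : pvSubst c = c := by simp [pvSubst, h]
        have hd : c ≠ '.' := fun hc => h (hc ▸ (by decide : ('.' : Char) ∈ pvSepList))
        simp only [h, decide_false, Bool.false_eq_true, if_neg, not_false_iff, List.map_cons, hs]
        rw [ih rtnset (buf ++ [c])]
        simp [pvTokens, hd]

-- ===== VERDICT (by name: the statement is the Claim_ definition above) =====
theorem normalizestrtoset_spec : Claim_equal_normalizestrtoset := by
  intro inputstr _
  unfold Spec_normalizestrtoset normalizestrtoset normalizestrtoset_alt
  dsimp only
  rw [pv_foldA, pv_splitOn_dot, pv_scan_tokens]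
  rfl
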